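-- pv_equiv track=rewrite | github.com/Vokrovec/FIKS | Latence/main.py | solve
-- ===== SOURCE A (Python) =====
-- def solve(task):
--     k = 1
--     for i in range(1, len(task)+1):
--         grupo = []
--         for lat in task:
--             if lat % i == 0:
--                 grupo.append(lat)
--         if len(grupo) >= i:
--
--             k = i
--     return k
-- ===== SOURCE B (Python) =====
-- def solve(task):
--     n = len(task)
--     zeros = 0
--     cnt = [0] * (n + 1)
--     for x in task:
--         ax = -x if x < 0 else x
--         if ax == 0:
--             zeros += 1
--         else:
--             j = 1
--             while j * j <= ax and j <= n:
--                 if ax % j == 0: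
--                     cnt[j] += 1
--                     q = ax // j
--                     if q != j and q <= n:
--                         cnt[q] += 1
--                 j += 1
--     for i in reversed(range(1, n + 1)):
--         if cnt[i] + zeros >= i:
--             return i
--     return 1
-- ===== Notes on version B (the rewrite author's own statement) =====
-- stated objective: faster
-- what changed: Instead of rescanning the whole list for every candidate i (n passes of n mod-tests), B makes one pass over the elements, bucket-counting the divisors of each |x| found by trial division up to min(sqrt(|x|), n) (zeros counted once as divisible by everything), then scans the buckets from n downward and returns the first i with cnt[i]+zeros >= i.
import Mathlib
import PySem

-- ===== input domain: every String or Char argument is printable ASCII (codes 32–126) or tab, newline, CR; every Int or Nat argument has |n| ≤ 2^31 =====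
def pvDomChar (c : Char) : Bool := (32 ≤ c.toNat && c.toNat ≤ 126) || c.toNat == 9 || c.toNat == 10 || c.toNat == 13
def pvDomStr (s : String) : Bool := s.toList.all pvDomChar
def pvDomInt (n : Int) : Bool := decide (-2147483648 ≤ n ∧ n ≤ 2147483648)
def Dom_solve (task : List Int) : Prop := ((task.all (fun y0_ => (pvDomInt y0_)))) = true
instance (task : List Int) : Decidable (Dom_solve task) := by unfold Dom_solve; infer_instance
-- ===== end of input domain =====

-- B replaces A's quadratic per-candidate rescans by one divisor-bucket pass (trial division of each
-- |x| up to min(√|x|, n)) followed by a backward scan; objective: faster on value-bounded inputs.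

-- ===== PORT A =====
def solve (task : List Int) : Int :=
  (PySem.List.pyRange 1 ((task.length : Int) + 1) 1).foldl
    (fun k i =>
      let grupo := task.foldl
        (fun g lat => if PySem.Int.mod lat i = 0 then g ++ [lat] else g) ([] : List Int)
      if (grupo.length : Int) ≥ i then i else k)
    1

-- ===== PORT B =====
-- cnt[j] += 1  (j is always a nonnegative in-range index when called)
def bBump (cnt : List Int) (j : Int) : List Int :=
  cnt.set j.toNat (PySem.List.pyGetD cnt j 0 + 1)

-- the `while j * j <= ax and j <= n` loop of Source B; fuel is a loop counter only
-- (fuel = ax ≥ number of iterations, since the loop stops once j*j > ax and j starts at 1)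
def bDivLoop : Nat → Int → Int → Int → List Int → List Int
  | 0, _, _, _, cnt => cnt
  | fuel+1, ax, n, j, cnt =>
    if j * j ≤ ax ∧ j ≤ n then
      let cnt' :=
        if PySem.Int.mod ax j = 0 then
          let cnt1 := bBump cnt j
          let q := PySem.Int.floordiv ax j
          if q ≠ j ∧ q ≤ n then bBump cnt1 q else cnt1
        else cnt
      bDivLoop fuel ax n (j + 1) cnt'
    else cnt

-- one element of the main `for x in task` loop of Source B
def bStep (n : Int) (zc : Int × List Int) (x : Int) : Int × List Int :=
  let ax := if x < 0 then -x else x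
  if ax = 0 then (zc.1 + 1, zc.2)
  else (zc.1, bDivLoop ax.toNat ax n 1 zc.2)

def solve_alt (task : List Int) : Int :=
  let n : Int := (task.length : Int)
  let zc := task.foldl (bStep n) (0, List.replicate (task.length + 1) (0 : Int))
  match ((PySem.List.pyRange 1 (n + 1) 1).reverse).find?
      (fun i => decide (PySem.List.pyGetD zc.2 i 0 + zc.1 ≥ i)) with
  | some i => i
  | none => 1

-- ===== PRECONDITION & SPEC =====
def Spec_solve (task : List Int) (out : Int) : Prop := out = solve_alt task
instance (task : List Int) (out : Int) : Decidable (Spec_solve task out) := by unfold Spec_solve; infer_instance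

-- ===== CLAIM (what is proved, stated in full; the proofs are below) =====
def Claim_equal_solve : Prop := ∀ (task : List Int), Dom_solve task → Spec_solve task (solve task)

-- ===== LEMMAS AND PROOFS =====

-- the unique loop index j at which bucket d is incremented (for d ∣ ax)
def tIdx (ax d : Int) : Int := if d * d ≤ ax then d else PySem.Int.floordiv ax d

theorem fdiv_mul_cancel {a b : Int} (hb : 1 ≤ b) (h : b ∣ a) :
    PySem.Int.floordiv a b * b = a := by
  have h1 := PySem.Int.floordiv_mul_add_mod a b
  have h2 : PySem.Int.mod a b = 0 := (PySem.Int.mod_eq_zero_iff_dvd a b).mpr h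
  omega

theorem tIdx_facts {ax d : Int} (hax : 1 ≤ ax) (hd : 1 ≤ d) (hdvd : d ∣ ax) :
    tIdx ax d ∣ ax ∧ 1 ≤ tIdx ax d ∧ tIdx ax d * tIdx ax d ≤ ax ∧ tIdx ax d ≤ d := by
  unfold tIdx
  split_ifs with h
  · exact ⟨hdvd, hd, h, le_refl d⟩
  · have hmul : PySem.Int.floordiv ax d * d = ax := fdiv_mul_cancel hd hdvd
    set e := PySem.Int.floordiv ax d with hedef
    have hepos : 1 ≤ e := by nlinarith
    have helt : e < d := by nlinarith
    exact ⟨⟨d, hmul.symm⟩, hepos, by nlinarith, by omega⟩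

theorem bump_length (cnt : List Int) (e : Int) : (bBump cnt e).length = cnt.length := by
  simp [bBump]

theorem bump_getD (cnt : List Int) (e d : Int) (he : 0 ≤ e) (helt : e.toNat < cnt.length)
    (hd : 0 ≤ d) (hdlt : d.toNat < cnt.length) :
    PySem.List.pyGetD (bBump cnt e) d 0
      = PySem.List.pyGetD cnt d 0 + (if d = e then 1 else 0) := by
  rw [PySem.List.pyGetD_eq_getElem _ _ hd (by rw [bump_length]; omega),
      PySem.List.pyGetD_eq_getElem _ _ hd (by omega)]
  unfold bBump
  rw [List.getElem_set]
  by_cases hde : d = e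
  · subst hde
    simp [PySem.List.pyGetD_eq_getElem _ _ hd (by omega : d < (cnt.length : Int))]
  · have : e.toNat ≠ d.toNat := by omega
    simp [this, hde]

theorem divLoop_length (fuel : Nat) (ax n j : Int) (cnt : List Int) :
    (bDivLoop fuel ax n j cnt).length = cnt.length := by
  induction fuel generalizing j cnt with
  | zero => rfl
  | succ fuel ih =>
    simp only [bDivLoop]
    split
    · rw [ih]
      split
      · split_ifs <;> simp [bump_length]
      · rfl
    · rfl

theorem divLoop_getD (fuel : Nat) (ax n : Int) : ∀ (j : Int) (cnt : List Int) (d : Int),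
    1 ≤ ax → 1 ≤ j → ax < j + fuel → 1 ≤ d → d ≤ n → n.toNat < cnt.length →
    PySem.List.pyGetD (bDivLoop fuel ax n j cnt) d 0
      = PySem.List.pyGetD cnt d 0 + (if d ∣ ax ∧ j ≤ tIdx ax d then 1 else 0) := by
  induction fuel with
  | zero =>
    intro j cnt d hax hj hfuel hd hdn hlen
    have h0 : ¬ (d ∣ ax ∧ j ≤ tIdx ax d) := by
      rintro ⟨hdvd, hjt⟩
      obtain ⟨ht1, ht2, ht3, ht4⟩ := tIdx_facts hax hd hdvd
      have := Int.le_of_dvd (by omega) ht1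
      omega
    simp [bDivLoop, h0]
  | succ fuel ih =>
    intro j cnt d hax hj hfuel hd hdn hlen
    by_cases hcond : j * j ≤ ax ∧ j ≤ n
    case neg =>
      have h0 : ¬ (d ∣ ax ∧ j ≤ tIdx ax d) := by
        rintro ⟨hdvd, hjt⟩
        obtain ⟨ht1, ht2, ht3, ht4⟩ := tIdx_facts hax hd hdvd
        exact hcond ⟨by nlinarith, by omega⟩
      simp [bDivLoop, hcond, h0]
    case pos =>
      obtain ⟨hjj, hjn⟩ := hcond
      have hjlen : j.toNat < cnt.length := by omega
      have hdlen : d.toNat < cnt.length := by omega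
      have hstep : bDivLoop (fuel+1) ax n j cnt
          = bDivLoop fuel ax n (j + 1)
              (if PySem.Int.mod ax j = 0 then
                 (if PySem.Int.floordiv ax j ≠ j ∧ PySem.Int.floordiv ax j ≤ n then
                    bBump (bBump cnt j) (PySem.Int.floordiv ax j)
                  else bBump cnt j)
               else cnt) := by
        simp only [bDivLoop, if_pos (show j * j ≤ ax ∧ j ≤ n from ⟨hjj, hjn⟩)]
      rw [hstep]
      by_cases hmod : PySem.Int.mod ax j = 0
      case neg =>
        rw [if_neg hmod]
        rw [ih (j + 1) cnt d hax (by omega) (by omega) hd hdn hlen]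
        have hjnd : ¬ j ∣ ax := fun h => hmod ((PySem.Int.mod_eq_zero_iff_dvd ax j).mpr h)
        have hind : (if d ∣ ax ∧ j + 1 ≤ tIdx ax d then (1:Int) else 0)
            = (if d ∣ ax ∧ j ≤ tIdx ax d then 1 else 0) := by
          by_cases hdvd : d ∣ ax
          · obtain ⟨ht1, ht2, ht3, ht4⟩ := tIdx_facts hax hd hdvd
            have htj : tIdx ax d ≠ j := fun h => hjnd (h ▸ ht1)
            split_ifs <;> first | rfl | (exfalso; omega)
          · simp [hdvd]
        omega
      case pos =>
        rw [if_pos hmod]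
        have hjdvd : j ∣ ax := (PySem.Int.mod_eq_zero_iff_dvd ax j).mp hmod
        have hqmul : PySem.Int.floordiv ax j * j = ax := fdiv_mul_cancel hj hjdvd
        set q := PySem.Int.floordiv ax j with hqdef
        have hqpos : 1 ≤ q := by nlinarith
        have hqge : j ≤ q := by nlinarith
        have hlen1 : n.toNat <
            (if q ≠ j ∧ q ≤ n then bBump (bBump cnt j) q else bBump cnt j).length := by
          split_ifs <;> simp [bump_length] <;> omega
        rw [ih (j + 1) _ d hax (by omega) (by omega) hd hdn hlen1]
        have hbj : PySem.List.pyGetD (bBump cnt j) d 0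
            = PySem.List.pyGetD cnt d 0 + (if d = j then 1 else 0) :=
          bump_getD cnt j d (by omega) (by omega) (by omega) (by omega)
        have hget : PySem.List.pyGetD
              (if q ≠ j ∧ q ≤ n then bBump (bBump cnt j) q else bBump cnt j) d 0
            = PySem.List.pyGetD cnt d 0 + (if d = j then 1 else 0)
              + (if d = q ∧ q ≠ j ∧ q ≤ n then 1 else 0) := by
          by_cases hqn : q ≠ j ∧ q ≤ n
          · rw [if_pos hqn, bump_getD _ q d (by omega) (by simp [bump_length]; omega) (by omega)
                (by simp [bump_length]; omega), hbj]
            split_ifs <;> simp_all <;> omega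
          · rw [if_neg hqn, hbj]
            have hno : ¬ (d = q ∧ q ≠ j ∧ q ≤ n) := by
              rintro ⟨h1, h2, h3⟩; exact hqn ⟨h2, h3⟩
            rw [if_neg hno]; ring
        rw [hget]
        -- combinatorial core: the bumps at iteration j account exactly for tIdx = j
        by_cases hdvd : d ∣ ax
        case neg =>
          have hdj : d ≠ j := fun h => hdvd (h ▸ hjdvd)
          have hdq : d ≠ q := fun h => hdvd (h ▸ ⟨j, hqmul.symm⟩)
          simp only [if_neg hdj, if_neg (by rintro ⟨h1, _⟩; exact hdq h1 : ¬ (d = q ∧ q ≠ j ∧ q ≤ n)),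
            if_neg (by rintro ⟨h1, _⟩; exact hdvd h1 : ¬ (d ∣ ax ∧ j + 1 ≤ tIdx ax d)),
            if_neg (by rintro ⟨h1, _⟩; exact hdvd h1 : ¬ (d ∣ ax ∧ j ≤ tIdx ax d))]
          omega
        case pos =>
          obtain ⟨ht1, ht2, ht3, ht4⟩ := tIdx_facts hax hd hdvd
          by_cases hdj : d = j
          · have htd : tIdx ax d = d := by
              unfold tIdx; rw [if_pos (by rw [hdj]; exact hjj)]
            have hnq : ¬ (d = q ∧ q ≠ j ∧ q ≤ n) := by
              rintro ⟨h1, h2, _⟩; exact h2 (h1.symm.trans hdj)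
            simp only [if_pos hdj, if_neg hnq,
              if_neg (show ¬ (d ∣ ax ∧ j + 1 ≤ tIdx ax d) by rintro ⟨_, h⟩; omega),
              if_pos (show d ∣ ax ∧ j ≤ tIdx ax d from ⟨hdvd, by omega⟩)]
            omega
          · by_cases hdq : d = q
            · have hmd : d * j = ax := by rw [hdq]; exact hqmul
              have hdj' : j < d := by omega
              have hdd : ¬ d * d ≤ ax := by nlinarith
              have hfd : PySem.Int.floordiv ax d * d = ax := fdiv_mul_cancel hd hdvd
              have hfj : PySem.Int.floordiv ax d = j := by
                have h1 : PySem.Int.floordiv ax d * d = j * d := by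
                  rw [hfd]; linarith [mul_comm d j]
                exact mul_right_cancel₀ (by omega) h1
              have htd : tIdx ax d = j := by unfold tIdx; rw [if_neg hdd]; exact hfj
              simp only [if_neg hdj,
                if_pos (show d = q ∧ q ≠ j ∧ q ≤ n from
                  ⟨hdq, fun h => hdj (by omega), by omega⟩),
                if_neg (show ¬ (d ∣ ax ∧ j + 1 ≤ tIdx ax d) by rintro ⟨_, h⟩; omega),
                if_pos (show d ∣ ax ∧ j ≤ tIdx ax d from ⟨hdvd, by omega⟩)]
              omega
            · have htj : tIdx ax d ≠ j := by
                intro h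
                unfold tIdx at h
                split_ifs at h with hdd
                · exact hdj h
                · have hfd : PySem.Int.floordiv ax d * d = ax := fdiv_mul_cancel hd hdvd
                  rw [h] at hfd
                  have h1 : j * d = q * j := by rw [hfd, ← hqmul]
                  have h2 : d = q := by
                    have hj0 : j ≠ 0 := by omega
                    have h3 : j * d = j * q := by linarith [mul_comm q j]
                    exact mul_left_cancel₀ hj0 h3
                  exact hdq h2
              have hnq : ¬ (d = q ∧ q ≠ j ∧ q ≤ n) := by rintro ⟨h1, _⟩; exact hdq h1
              simp only [if_neg hdj, if_neg hnq]
              have hind : (if d ∣ ax ∧ j + 1 ≤ tIdx ax d then (1:Int) else 0)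
                  = (if d ∣ ax ∧ j ≤ tIdx ax d then 1 else 0) := by
                split_ifs <;> first | rfl | (exfalso; omega)
              omega

theorem fold_getD (n : Int) (xs : List Int) : ∀ (z : Int) (cnt : List Int) (d : Int),
    1 ≤ d → d ≤ n → n.toNat < cnt.length →
    (xs.foldl (bStep n) (z, cnt)).2.length = cnt.length ∧
    (xs.foldl (bStep n) (z, cnt)).1 + PySem.List.pyGetD (xs.foldl (bStep n) (z, cnt)).2 d 0
      = z + PySem.List.pyGetD cnt d 0 + (xs.countP (fun x => decide (d ∣ x)) : Int) := by
  induction xs with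
  | nil => intro z cnt d hd hdn hlen; simp
  | cons x xs ih =>
    intro z cnt d hd hdn hlen
    rw [List.foldl_cons]
    by_cases hx : x = 0
    · subst hx
      have hb : bStep n (z, cnt) (0:Int) = (z + 1, cnt) := by simp [bStep]
      rw [hb]
      obtain ⟨hl, hv⟩ := ih (z+1) cnt d hd hdn hlen
      refine ⟨hl, ?_⟩
      rw [hv, List.countP_cons]
      have hd0 : (decide (d ∣ (0:Int))) = true := by simp
      rw [hd0]
      simp only [if_pos rfl]
      push_cast
      ring
    · have hax : (1:Int) ≤ (if x < 0 then -x else x) := by split_ifs <;> omega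
      have hb : bStep n (z, cnt) x
          = (z, bDivLoop (if x < 0 then -x else x).toNat (if x < 0 then -x else x) n 1 cnt) := by
        simp only [bStep]
        rw [if_neg (by omega)]
      rw [hb]
      set ax := if x < 0 then -x else x with haxdef
      obtain ⟨hl, hv⟩ := ih z (bDivLoop ax.toNat ax n 1 cnt) d hd hdn
        (by rw [divLoop_length]; exact hlen)
      refine ⟨by rw [hl, divLoop_length], ?_⟩
      rw [hv, divLoop_getD ax.toNat ax n 1 cnt d hax (by omega) (by omega) hd hdn hlen]
      have hdax : (d ∣ ax) ↔ d ∣ x := by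
        rw [haxdef]; split_ifs <;> simp [Int.dvd_neg]
      have hcond : (d ∣ ax ∧ 1 ≤ tIdx ax d) ↔ d ∣ x := by
        constructor
        · rintro ⟨h, _⟩; exact hdax.mp h
        · intro h
          have h' := hdax.mpr h
          exact ⟨h', (tIdx_facts hax hd h').2.1⟩
      rw [List.countP_cons]
      by_cases hdx : d ∣ x
      · rw [if_pos (hcond.mpr hdx)]
        simp only [hdx, decide_true, if_pos]
        push_cast
        ring
      · rw [if_neg (fun h => hdx (hcond.mp h))]
        simp only [hdx, decide_false, if_neg]
        push_cast
        ring


theorem getD_replicate_zero (m : Nat) (d : Int) :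
    PySem.List.pyGetD (List.replicate m (0 : Int)) d 0 = 0 := by
  by_cases h : 0 ≤ d ∧ d < (m : Int)
  · rw [PySem.List.pyGetD_eq_getElem _ _ h.1 (by simpa using h.2)]
    simp
  · unfold PySem.List.pyGetD
    cases hg : PySem.List.pyGet? (List.replicate m (0 : Int)) d with
    | none => rfl
    | some v =>
      have := PySem.List.mem_of_pyGet?_eq_some _ hg
      simp [List.eq_of_mem_replicate this]

theorem find?_congr_mem {α : Type} (l : List α) (p q : α → Bool)
    (h : ∀ x ∈ l, p x = q x) : l.find? p = l.find? q := by
  induction l with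
  | nil => rfl
  | cons x xs ih =>
    simp only [List.find?_cons]
    rw [h x (by simp)]
    cases q x <;> simp [ih (fun y hy => h y (by simp [hy]))]

theorem foldl_lastSat (P : Int → Prop) [DecidablePred P] : ∀ (l : List Int) (a : Int),
    l.foldl (fun k i => if P i then i else k) a
      = (l.reverse.find? (fun i => decide (P i))).getD a := by
  intro l
  induction l with
  | nil => intro a; rfl
  | cons x xs ih =>
    intro a
    simp only [List.foldl_cons, List.reverse_cons, List.find?_append]
    rw [ih]
    cases hfind : xs.reverse.find? (fun i => decide (P i)) <;>
      simp [List.find?_cons] <;> split_ifs <;> simp_all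

theorem solve_spec_main (task : List Int) : solve task = solve_alt task := by
  have hA : solve task
      = (((PySem.List.pyRange 1 ((task.length : Int) + 1) 1).reverse).find?
          (fun i => decide (((task.filter (fun lat => decide (PySem.Int.mod lat i = 0))).length : Int) ≥ i))).getD 1 := by
    unfold solve
    have hfun : (fun (k i : Int) =>
        let grupo := task.foldl
          (fun g lat => if PySem.Int.mod lat i = 0 then g ++ [lat] else g) ([] : List Int)
        if (grupo.length : Int) ≥ i then i else k)
        = (fun (k i : Int) =>
            if ((task.filter (fun lat => decide (PySem.Int.mod lat i = 0))).length : Int) ≥ i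
            then i else k) := by
      funext k i
      rw [show (task.foldl
          (fun g lat => if PySem.Int.mod lat i = 0 then g ++ [lat] else g) ([] : List Int))
          = [] ++ task.filter (fun lat => decide (PySem.Int.mod lat i = 0)) from
        PySem.List.foldl_append_ite_eq_filter _ task []]
      rw [List.nil_append]
    rw [hfun, foldl_lastSat
      (fun i => ((task.filter (fun lat => decide (PySem.Int.mod lat i = 0))).length : Int) ≥ i)]
  set n : Int := (task.length : Int) with hn
  set zc := task.foldl (bStep n) (0, List.replicate (task.length + 1) (0 : Int)) with hzc
  have hB : solve_alt task
      = (((PySem.List.pyRange 1 (n + 1) 1).reverse).find?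
          (fun i => decide (PySem.List.pyGetD zc.2 i 0 + zc.1 ≥ i))).getD 1 := by
    unfold solve_alt
    show (match ((PySem.List.pyRange 1 (n + 1) 1).reverse).find?
        (fun i => decide (PySem.List.pyGetD zc.2 i 0 + zc.1 ≥ i)) with
      | some i => i | none => 1) = _
    cases hf : ((PySem.List.pyRange 1 (n + 1) 1).reverse).find?
        (fun i => decide (PySem.List.pyGetD zc.2 i 0 + zc.1 ≥ i)) <;> simp [hf]
  rw [hA, hB]
  have hfind : (((PySem.List.pyRange 1 (n + 1) 1).reverse).find?
        (fun i => decide (((task.filter (fun lat => decide (PySem.Int.mod lat i = 0))).length : Int) ≥ i)))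
      = (((PySem.List.pyRange 1 (n + 1) 1).reverse).find?
        (fun i => decide (PySem.List.pyGetD zc.2 i 0 + zc.1 ≥ i))) := by
    apply find?_congr_mem
    intro i hi
    rw [List.mem_reverse, PySem.List.mem_pyRange_one] at hi
    obtain ⟨hi1, hi2⟩ := hi
    have hcount : task.countP (fun lat => decide (PySem.Int.mod lat i = 0))
        = task.countP (fun x => decide (i ∣ x)) := by
      apply List.countP_congr
      intro x _
      simp [PySem.Int.mod_eq_zero_iff_dvd]
    obtain ⟨hl, hv⟩ := fold_getD n task 0 (List.replicate (task.length + 1) (0 : Int)) i hi1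
      (by omega) (by simp; omega)
    rw [← hzc] at hv
    rw [getD_replicate_zero] at hv
    rw [decide_eq_decide, ← List.countP_eq_length_filter, hcount]
    omega
  rw [hfind]

-- ===== VERDICT (by name: the statement is the Claim_ definition above) =====
theorem solve_spec : Claim_equal_solve := by
  intro task _
  unfold Spec_solve
  exact solve_spec_main task
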